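-- pv_equiv track=rewrite | github.com/jam928/python-algo | amazon_oa/shopping_options.py | get_number_of_options
-- ===== SOURCE A (Python) =====
-- def get_number_of_options(price_of_jeans, price_of_shoes, price_of_skirts, price_of_tops, dollars):
--     options = 0
--
--     sum_map = {}
--
--     # store A+B as key and its sum as value
--     for price_of_jean in price_of_jeans:
--         for price_of_shoe in price_of_shoes:
--             ab = price_of_jean + price_of_shoe
--             sum_map[ab] = sum_map.get(ab, 0) + 1
--
--     # add up the values from -C+D
--     for price_of_skirt in price_of_skirts:
--         for price_of_top in price_of_tops:
--             cd = dollars - (price_of_skirt+price_of_top)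
--
--             lst_set = {key for key in sum_map.keys() if key <= cd}
--             for item in lst_set:
--                 options += sum_map.get(item)
--
--     return options
-- ===== SOURCE B (Python) =====
-- def get_number_of_options(price_of_jeans, price_of_shoes, price_of_skirts, price_of_tops, dollars):
--     # Sort all jean+shoe sums once; for each skirt+top pair, a binary search
--     # (standard bisect_right, hand-written because this module imports nothing)
--     # counts how many jean+shoe sums fit in the remaining budget.
--     ab_sorted = sorted(j + s for j in price_of_jeans for s in price_of_shoes)
--
--     def _bisect_right(a, x):
--         lo, hi = 0, len(a)
--         while lo < hi:
--             mid = (lo + hi) // 2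
--             if x < a[mid]:
--                 hi = mid
--             else:
--                 lo = mid + 1
--         return lo
--
--     total = 0
--     for c in price_of_skirts:
--         for t in price_of_tops:
--             total += _bisect_right(ab_sorted, dollars - (c + t))
--     return total
-- ===== Notes on version B (the rewrite author's own statement) =====
-- stated objective: faster
-- what changed: Replaces the per-query scan over the whole jean+shoe dictionary (a set comprehension plus a summing loop for every skirt+top pair) by one sorted list of jean+shoe sums and a binary search per skirt+top pair.
import Mathlib
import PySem

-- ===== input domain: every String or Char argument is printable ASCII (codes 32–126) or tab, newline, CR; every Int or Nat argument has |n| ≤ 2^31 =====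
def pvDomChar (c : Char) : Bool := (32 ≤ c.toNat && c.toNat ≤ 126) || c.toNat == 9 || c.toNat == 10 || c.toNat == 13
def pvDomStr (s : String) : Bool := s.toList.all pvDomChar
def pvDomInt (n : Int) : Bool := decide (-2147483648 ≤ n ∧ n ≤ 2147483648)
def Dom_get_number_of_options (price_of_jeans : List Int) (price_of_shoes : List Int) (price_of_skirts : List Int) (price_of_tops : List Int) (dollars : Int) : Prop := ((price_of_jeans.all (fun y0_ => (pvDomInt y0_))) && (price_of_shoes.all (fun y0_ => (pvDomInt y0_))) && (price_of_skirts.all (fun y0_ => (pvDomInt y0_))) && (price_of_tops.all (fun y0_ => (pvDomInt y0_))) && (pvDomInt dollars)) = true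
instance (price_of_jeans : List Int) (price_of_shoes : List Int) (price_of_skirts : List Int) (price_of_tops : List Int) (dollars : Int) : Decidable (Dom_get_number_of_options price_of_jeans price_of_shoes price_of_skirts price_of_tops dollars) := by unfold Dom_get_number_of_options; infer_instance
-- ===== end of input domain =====

-- B replaces A's per-(skirt,top) scan of the jean+shoe sum dictionary by one sorted
-- list of jean+shoe sums plus a binary search (bisect_right) per (skirt,top) pair: faster.


-- ===== PORT A =====
-- literal port: counter dict of jean+shoe sums; then for each skirt+top pair,
-- the set comprehension {key for key in sum_map.keys() if key <= cd} (summed over —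
-- order-independent, so PySem.Set is exact) and `options += sum_map.get(item)`;
-- item is always a key of sum_map, so `.get(item)` is `getD item 0` exactly.
def get_number_of_options (price_of_jeans : List Int) (price_of_shoes : List Int) (price_of_skirts : List Int) (price_of_tops : List Int) (dollars : Int) : Int :=
  let sum_map : PySem.Dict Int Int :=
    price_of_jeans.foldl (fun d price_of_jean =>
      price_of_shoes.foldl (fun d price_of_shoe =>
        let ab := price_of_jean + price_of_shoe
        d.insert ab (d.getD ab 0 + 1)) d) PySem.Dict.empty
  price_of_skirts.foldl (fun options price_of_skirt =>
    price_of_tops.foldl (fun options price_of_top =>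
      let cd := dollars - (price_of_skirt + price_of_top)
      let lst_set : PySem.Set Int := PySem.Set.ofList (sum_map.keys.filter (fun key => decide (key ≤ cd)))
      lst_set.foldl (fun options item => options + sum_map.getD item 0) options) options) 0

-- ===== PORT B =====
-- literal port of Source B: the sorted genexp is PySem.List.sorted of the flatMap;
-- the hand-written `_bisect_right` is exactly the standard bisect_right algorithm,
-- ported as PySem.List.bisectRight.
def get_number_of_options_alt (price_of_jeans : List Int) (price_of_shoes : List Int) (price_of_skirts : List Int) (price_of_tops : List Int) (dollars : Int) : Int :=
  let ab_sorted : List Int :=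
    PySem.List.sorted (price_of_jeans.flatMap (fun j => price_of_shoes.map (fun s => j + s))) (fun x => x) false
  price_of_skirts.foldl (fun total c =>
    price_of_tops.foldl (fun total t =>
      total + (PySem.List.bisectRight ab_sorted (dollars - (c + t)) : Int)) total) 0

-- ===== PRECONDITION & SPEC =====
def Spec_get_number_of_options (price_of_jeans : List Int) (price_of_shoes : List Int) (price_of_skirts : List Int) (price_of_tops : List Int) (dollars : Int) (out : Int) : Prop := out = get_number_of_options_alt price_of_jeans price_of_shoes price_of_skirts price_of_tops dollars
instance (price_of_jeans : List Int) (price_of_shoes : List Int) (price_of_skirts : List Int) (price_of_tops : List Int) (dollars : Int) (out : Int) : Decidable (Spec_get_number_of_options price_of_jeans price_of_shoes price_of_skirts price_of_tops dollars out) := by unfold Spec_get_number_of_options; infer_instance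

-- ===== CLAIM (what is proved, stated in full; the proofs are below) =====
def Claim_equal_get_number_of_options : Prop := ∀ (price_of_jeans : List Int) (price_of_shoes : List Int) (price_of_skirts : List Int) (price_of_tops : List Int) (dollars : Int), Dom_get_number_of_options price_of_jeans price_of_shoes price_of_skirts price_of_tops dollars → Spec_get_number_of_options price_of_jeans price_of_shoes price_of_skirts price_of_tops dollars (get_number_of_options price_of_jeans price_of_shoes price_of_skirts price_of_tops dollars)

-- ===== LEMMAS AND PROOFS =====

-- A's nested dict-building loop is the Counter of the flattened list of jean+shoe sums.
theorem buildA_eq_counter (jeans shoes : List Int) :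
    jeans.foldl (fun d price_of_jean =>
      shoes.foldl (fun d price_of_shoe =>
        d.insert (price_of_jean + price_of_shoe) (d.getD (price_of_jean + price_of_shoe) 0 + 1)) d) PySem.Dict.empty
    = PySem.Dict.counter (jeans.flatMap (fun j => shoes.map (fun s => j + s))) := by
  rw [← PySem.Dict.foldl_insert_getD_add_one_eq_counter, List.foldl_flatMap]
  simp [List.foldl_map]

-- counting identity: summing the multiplicities of the distinct elements ≤ cd of L
-- counts the elements of L that are ≤ cd.
theorem sum_count_filter (L : List Int) (p : Int → Bool) :
    (((PySem.Set.ofList L).filter p).map (fun k => (L.count k : Int))).sum = (L.countP p : Int) := by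
  have hnd : ((PySem.Set.ofList L).filter p).Nodup := (PySem.Set.nodup_ofList L).filter p
  rw [← List.sum_toFinset _ hnd]
  have hfin : ((PySem.Set.ofList L).filter p).toFinset = (L.filter p).toFinset := by
    apply Finset.ext
    intro k
    simp [PySem.Set.mem_ofList]
  rw [hfin]
  have : ∀ k ∈ (L.filter p).toFinset, (L.count k : Int) = ((L.filter p).count k : Int) := by
    intro k hk
    rw [List.count_filter (List.mem_toFinset.mp hk |> List.of_mem_filter)]
  rw [Finset.sum_congr rfl this, ← Nat.cast_sum]
  have h2 := Multiset.toFinset_sum_count_eq ((L.filter p : List Int) : Multiset Int)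
  rw [List.countP_eq_length_filter]
  exact congrArg Nat.cast (by simpa using h2)

-- bisect_right on a sorted list counts the elements ≤ x.
theorem bisectRight_eq_countP (a : List Int) (x : Int) (h : a.Pairwise (· ≤ ·)) :
    PySem.List.bisectRight a x = a.countP (fun k => decide (k ≤ x)) := by
  obtain ⟨hle, h1, h2⟩ := PySem.List.bisectRight_spec a x h
  set b := PySem.List.bisectRight a x with hb
  have hsplit : a = a.take b ++ a.drop b := (List.take_append_drop b a).symm
  have htake : (a.take b).countP (fun k => decide (k ≤ x)) = (a.take b).length := by
    rw [List.countP_eq_length]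
    intro y hy
    obtain ⟨j, hj, rfl⟩ := List.mem_iff_getElem.mp hy
    have hj' : j < b := lt_of_lt_of_le hj (by simp)
    have : j < a.length := lt_of_lt_of_le hj' hle
    rw [List.getElem_take]
    simpa using h1 j this hj'
  have hdrop : (a.drop b).countP (fun k => decide (k ≤ x)) = 0 := by
    rw [List.countP_eq_zero]
    intro y hy
    obtain ⟨j, hj, rfl⟩ := List.mem_iff_getElem.mp hy
    rw [List.getElem_drop]
    have hlt : b + j < a.length := by
      have := hj; simp [List.length_drop] at this; omega
    have := h2 (b + j) hlt (Nat.le_add_right b j)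
    simpa using not_le.mpr this
  conv_rhs => rw [hsplit]
  rw [List.countP_append, htake, hdrop, List.length_take]
  omega

-- A's inner set-comprehension-and-sum loop, over the Counter of L, adds countP (· ≤ cd) L.
theorem innerA_eq (L : List Int) (cd options : Int) :
    (PySem.Set.ofList ((PySem.Dict.counter L).keys.filter (fun key => decide (key ≤ cd)))).foldl
      (fun options item => options + (PySem.Dict.counter L).getD item 0) options
    = options + (L.countP (fun k => decide (k ≤ cd)) : Int) := by
  rw [PySem.Dict.keys_counter]
  have hnd : ((PySem.Set.ofList L).filter (fun key => decide (key ≤ cd))).Nodup :=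
    (PySem.Set.nodup_ofList L).filter _
  rw [PySem.Set.ofList_eq_self_of_nodup _ hnd]
  rw [PySem.List.foldl_add]
  congr 1
  have : ∀ k, (PySem.Dict.counter L).getD k 0 = (L.count k : Int) :=
    fun k => PySem.Dict.getD_counter L k
  calc (((PySem.Set.ofList L).filter (fun key => decide (key ≤ cd))).map
          (fun item => (PySem.Dict.counter L).getD item 0)).sum
      = (((PySem.Set.ofList L).filter (fun key => decide (key ≤ cd))).map
          (fun k => (L.count k : Int))).sum := by
        congr 1; exact List.map_congr_left (fun k _ => this k)
    _ = (L.countP (fun k => decide (k ≤ cd)) : Int) := sum_count_filter L _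

-- B's binary search on the sorted sums also adds countP (· ≤ cd) L.
theorem innerB_eq (L : List Int) (cd : Int) :
    (PySem.List.bisectRight (PySem.List.sorted L (fun x => x) false) cd : Int)
    = (L.countP (fun k => decide (k ≤ cd)) : Int) := by
  have hpw : (PySem.List.sorted L (fun x => x) false).Pairwise (· ≤ ·) := by
    simpa using PySem.List.sorted_pairwise L (fun x => x)
  rw [bisectRight_eq_countP _ _ hpw]
  exact congrArg (Nat.cast (R := Int)) ((PySem.List.sorted_perm L (fun x => x) false).countP_eq (fun k => decide (k ≤ cd)))

-- ===== VERDICT (by name: the statement is the Claim_ definition above) =====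
theorem get_number_of_options_spec : Claim_equal_get_number_of_options := by
  intro jeans shoes skirts tops dollars _
  unfold Spec_get_number_of_options get_number_of_options get_number_of_options_alt
  rw [buildA_eq_counter]
  show skirts.foldl _ 0 = skirts.foldl _ 0
  congr 1
  funext options skirt
  show tops.foldl _ options = tops.foldl _ options
  congr 1
  funext o top
  show (PySem.Set.ofList ((PySem.Dict.counter (jeans.flatMap (fun j => shoes.map (fun s => j + s)))).keys.filter (fun key => decide (key ≤ dollars - (skirt + top))))).foldl
      (fun options item => options + (PySem.Dict.counter (jeans.flatMap (fun j => shoes.map (fun s => j + s)))).getD item 0) o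
    = o + (PySem.List.bisectRight (PySem.List.sorted (jeans.flatMap (fun j => shoes.map (fun s => j + s))) (fun x => x) false) (dollars - (skirt + top)) : Int)
  rw [innerA_eq, innerB_eq]
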